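-- pv_equiv track=rewrite | github.com/carlosp/advent-of-code | 2024/19-linen-layout/solve_1.py | countPossibleDesigns
-- ===== SOURCE A (Python) =====
-- from functools import cache
--
-- def countPossibleDesigns(availablePatterns: list[str], desiredDesigns: list[str]) -> int:
-- 	@cache
-- 	def isDesignPossible(design: str) -> bool:
-- 		return design == '' or any(
-- 			isDesignPossible(design.removeprefix(pattern))
-- 			for pattern in availablePatterns
-- 			if design.startswith(pattern)
-- 		)
--
-- 	return sum(map(isDesignPossible, desiredDesigns))
-- ===== SOURCE B (Python) =====
-- def countPossibleDesigns(availablePatterns, desiredDesigns):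
--     byLen = {}
--     for p in availablePatterns:
--         byLen.setdefault(len(p), set()).add(p)
--     total = 0
--     for design in desiredDesigns:
--         n = len(design)
--         dp = [False] * (n + 1)
--         dp[n] = True
--         for i in range(n - 1, -1, -1):
--             for l, s in byLen.items():
--                 if i + l <= n and dp[i + l] and design[i:i + l] in s:
--                     dp[i] = True
--                     break
--         total += dp[0]
--     return total
-- ===== Notes on version B (the rewrite author's own statement) =====
-- stated objective: faster
-- what changed: Replaces A's memoized top-down recursion over string suffixes with an iterative bottom-up boolean DP table over positions, with the patterns indexed once by length into hash sets so the inner scan over all patterns becomes one O(len) set lookup per distinct pattern length.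
import Mathlib
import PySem

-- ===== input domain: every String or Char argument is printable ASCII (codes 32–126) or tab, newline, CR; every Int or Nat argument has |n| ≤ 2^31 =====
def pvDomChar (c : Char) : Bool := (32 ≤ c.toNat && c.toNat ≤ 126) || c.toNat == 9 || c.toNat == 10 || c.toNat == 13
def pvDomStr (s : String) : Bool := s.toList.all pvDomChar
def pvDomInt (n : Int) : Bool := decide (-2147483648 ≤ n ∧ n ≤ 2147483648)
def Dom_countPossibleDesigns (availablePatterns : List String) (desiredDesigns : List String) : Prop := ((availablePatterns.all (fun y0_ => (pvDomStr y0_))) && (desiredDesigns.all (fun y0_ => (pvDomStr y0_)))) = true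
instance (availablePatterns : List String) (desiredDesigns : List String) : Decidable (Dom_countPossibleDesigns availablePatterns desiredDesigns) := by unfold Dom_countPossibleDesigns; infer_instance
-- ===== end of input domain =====

-- B replaces A's memoized top-down recursion over suffix strings with an iterative
-- bottom-up boolean DP table over positions, indexing the patterns once by length into
-- hash sets so the inner scan over all patterns disappears. Pre_ is exactly A's
-- termination condition (A raises RecursionError outside it).


-- ===== PORT A =====
-- A's memoized recursion 'isDesignPossible'; the @cache only memoizes a pure Bool, so
-- the value is that of the plain recursion.  Wherever the Python terminates the
-- recursion removes a matched prefix at each step without re-entering the same design,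
-- so fuel = |design|+1 suffices and the fuel guard is never the deciding branch.
def pvIsPossibleA (ps : List String) : Nat → List Char → Bool
  | 0, _ => false
  | fuel + 1, d =>
      d.isEmpty ||
      ps.any (fun p => p.toList.isPrefixOf d && pvIsPossibleA ps fuel (d.drop p.toList.length))

def countPossibleDesigns (availablePatterns : List String) (desiredDesigns : List String) : Int :=
  desiredDesigns.foldl
    (fun acc s => acc + (if pvIsPossibleA availablePatterns (s.toList.length + 1) s.toList then 1 else 0)) 0

-- ===== PORT B =====
-- Source B's 'byLen.setdefault(len(p), set()).add(p)': an insertion-ordered association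
-- list length ↦ set of the patterns of that length.
def pvAddPat (acc : List (Nat × PySem.Set String)) (p : String) : List (Nat × PySem.Set String) :=
  match acc with
  | [] => [(p.toList.length, PySem.Set.add PySem.Set.empty p)]
  | (l, s) :: t =>
      if l = p.toList.length then (l, PySem.Set.add s p) :: t
      else (l, s) :: pvAddPat t p

def pvByLen (ps : List String) : List (Nat × PySem.Set String) := ps.foldl pvAddPat []

-- Source B's backwards loop 'for i in range(n-1,-1,-1): for l, s in byLen.items(): …'
-- rendered as structural recursion on the suffix: pvBuildDp items d is the table
-- dp[i..n] for the suffix d; Python's read dp[i+l] sees dp[i] still False while being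
-- assigned, so it is entry l of (false :: tail-table); design[i:i+l] is take l.
def pvBuildDp (items : List (Nat × PySem.Set String)) : List Char → List Bool
  | [] => [true]
  | c :: rest =>
      let dp := pvBuildDp items rest
      (items.any fun pr =>
        decide (pr.1 ≤ rest.length + 1) && (false :: dp).getD pr.1 false
          && pr.2.contains (String.ofList ((c :: rest).take pr.1))) :: dp

def countPossibleDesigns_alt (availablePatterns : List String) (desiredDesigns : List String) : Int :=
  desiredDesigns.foldl
    (fun acc s => acc + (if (pvBuildDp (pvByLen availablePatterns) s.toList).getD 0 false then 1 else 0)) 0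

-- ===== PRECONDITION & SPEC =====
-- When '' is among the patterns, A's lazy 'any' tries patterns in order and a sub-call
-- either returns True or loops; so A terminates iff every design is consumed by the
-- forced greedy walk that always takes the first matching pattern listed BEFORE the
-- first '' (pvGreedyOk).  Pre_ is exactly that termination condition: it excludes no
-- input on which A returns (A raises RecursionError on everything outside Pre_).
def pvGreedyStep (E : List String) (d : List Char) : Option (List Char) :=
  E.findSome? (fun p =>
    if p.toList ≠ [] ∧ p.toList.isPrefixOf d then some (d.drop p.toList.length) else none)

theorem pvGreedyStep_lt (E : List String) (d d' : List Char)
    (h : pvGreedyStep E d = some d') : d'.length < d.length := by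
  obtain ⟨p, _, hp⟩ := List.exists_of_findSome?_eq_some h
  by_cases hc : p.toList ≠ [] ∧ p.toList.isPrefixOf d
  · rw [if_pos hc] at hp
    obtain ⟨hne, hpre⟩ := hc
    have h1 : 1 ≤ p.toList.length :=
      Nat.one_le_iff_ne_zero.mpr (fun h0 => hne (List.eq_nil_of_length_eq_zero h0))
    have h2 : p.toList.length ≤ d.length :=
      List.IsPrefix.length_le (List.isPrefixOf_iff_prefix.mp hpre)
    have hd' : d.drop p.toList.length = d' := Option.some.inj hp
    rw [← hd']
    simp only [List.length_drop]
    omega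
  · rw [if_neg hc] at hp; cases hp

def pvGreedyOk (E : List String) (d : List Char) : Bool :=
  if d.isEmpty then true
  else
    match h : pvGreedyStep E d with
    | none => false
    | some d' => pvGreedyOk E d'
termination_by d.length
decreasing_by exact pvGreedyStep_lt E d d' h

def Pre_countPossibleDesigns (availablePatterns : List String) (desiredDesigns : List String) : Prop :=
  "" ∉ availablePatterns ∨
    ∀ s ∈ desiredDesigns, pvGreedyOk (availablePatterns.takeWhile (fun p => p ≠ "")) s.toList = true
instance (availablePatterns : List String) (desiredDesigns : List String) : Decidable (Pre_countPossibleDesigns availablePatterns desiredDesigns) := by unfold Pre_countPossibleDesigns; infer_instance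

def pvWitness_countPossibleDesigns : List String × List String :=
  (["a", "ab", "b"], ["aab", "ba", "", "abb"])

def Spec_countPossibleDesigns (availablePatterns : List String) (desiredDesigns : List String) (out : Int) : Prop := out = countPossibleDesigns_alt availablePatterns desiredDesigns
instance (availablePatterns : List String) (desiredDesigns : List String) (out : Int) : Decidable (Spec_countPossibleDesigns availablePatterns desiredDesigns out) := by unfold Spec_countPossibleDesigns; infer_instance

-- ===== CLAIM (what is proved, stated in full; the proofs are below) =====
def Claim_equal_countPossibleDesigns : Prop := ∀ (availablePatterns : List String) (desiredDesigns : List String), Dom_countPossibleDesigns availablePatterns desiredDesigns → Pre_countPossibleDesigns availablePatterns desiredDesigns → Spec_countPossibleDesigns availablePatterns desiredDesigns (countPossibleDesigns availablePatterns desiredDesigns)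

-- ===== LEMMAS AND PROOFS =====

-- the pattern just inserted is in its length bucket
theorem pvAddPat_self (acc : List (Nat × PySem.Set String)) (p : String) :
    ∃ pr ∈ pvAddPat acc p, pr.1 = p.toList.length ∧ p ∈ pr.2 := by
  induction acc with
  | nil =>
      exact ⟨(p.toList.length, PySem.Set.add PySem.Set.empty p), List.mem_singleton.mpr rfl,
        rfl, show p ∈ PySem.Set.add PySem.Set.empty p from (PySem.Set.mem_add _ _ _).mpr (Or.inr rfl)⟩
  | cons hd t ih =>
      obtain ⟨l, s⟩ := hd
      simp only [pvAddPat]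
      by_cases hl : l = p.toList.length
      · rw [if_pos hl]
        exact ⟨(l, PySem.Set.add s p), List.mem_cons_self, hl,
          show p ∈ PySem.Set.add s p from (PySem.Set.mem_add _ _ _).mpr (Or.inr rfl)⟩
      · rw [if_neg hl]
        obtain ⟨pr, hpr, h1, h2⟩ := ih
        exact ⟨pr, List.mem_cons_of_mem _ hpr, h1, h2⟩

-- old bucket members survive an insertion, in a bucket with the same length key
theorem pvAddPat_old (acc : List (Nat × PySem.Set String)) (p : String)
    (pr : Nat × PySem.Set String) (hpr : pr ∈ acc) :
    ∃ pr' ∈ pvAddPat acc p, pr'.1 = pr.1 ∧ ∀ q ∈ pr.2, q ∈ pr'.2 := by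
  induction acc with
  | nil => cases hpr
  | cons hd t ih =>
      obtain ⟨l, s⟩ := hd
      simp only [pvAddPat]
      by_cases hl : l = p.toList.length
      · rw [if_pos hl]
        rcases List.mem_cons.mp hpr with heq | hmem
        · subst heq
          exact ⟨(l, PySem.Set.add s p), List.mem_cons_self, rfl,
            fun q hq => show q ∈ PySem.Set.add s p from (PySem.Set.mem_add _ _ _).mpr (Or.inl hq)⟩
        · exact ⟨pr, List.mem_cons_of_mem _ hmem, rfl, fun q hq => hq⟩
      · rw [if_neg hl]
        rcases List.mem_cons.mp hpr with heq | hmem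
        · exact ⟨(l, s), List.mem_cons_self, by rw [heq], fun q hq => by rw [heq] at hq; exact hq⟩
        · obtain ⟨pr', hpr', h1, h2⟩ := ih hmem
          exact ⟨pr', List.mem_cons_of_mem _ hpr', h1, h2⟩

-- any member of a bucket after an insertion is the inserted pattern or an old member
theorem pvAddPat_src (acc : List (Nat × PySem.Set String)) (p : String)
    (pr : Nat × PySem.Set String) (q : String)
    (hpr : pr ∈ pvAddPat acc p) (hq : q ∈ pr.2) :
    (q = p ∧ pr.1 = p.toList.length) ∨ ∃ pr' ∈ acc, pr'.1 = pr.1 ∧ q ∈ pr'.2 := by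
  induction acc with
  | nil =>
      simp only [pvAddPat, List.mem_singleton] at hpr
      subst hpr
      rcases (PySem.Set.mem_add _ _ _).mp
          (show q ∈ PySem.Set.add PySem.Set.empty p from hq) with h | rfl
      · cases h
      · exact Or.inl ⟨rfl, rfl⟩
  | cons hd t ih =>
      obtain ⟨l, s⟩ := hd
      simp only [pvAddPat] at hpr
      by_cases hl : l = p.toList.length
      · rw [if_pos hl] at hpr
        rcases List.mem_cons.mp hpr with heq | hmem
        · subst heq
          rcases (PySem.Set.mem_add _ _ _).mp
              (show q ∈ PySem.Set.add s p from hq) with h | rfl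
          · exact Or.inr ⟨(l, s), List.mem_cons_self, rfl, h⟩
          · exact Or.inl ⟨rfl, hl⟩
        · exact Or.inr ⟨pr, List.mem_cons_of_mem _ hmem, rfl, hq⟩
      · rw [if_neg hl] at hpr
        rcases List.mem_cons.mp hpr with heq | hmem
        · exact Or.inr ⟨(l, s), List.mem_cons_self, by rw [heq], by rw [← heq]; exact hq⟩
        · rcases ih hmem with h | ⟨pr', hpr', h1, h2⟩
          · exact Or.inl h
          · exact Or.inr ⟨pr', List.mem_cons_of_mem _ hpr', h1, h2⟩

theorem pvByLen_sound_aux (ps : List String) :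
    ∀ (acc : List (Nat × PySem.Set String)) (p : String),
      (p ∈ ps ∨ ∃ pr ∈ acc, pr.1 = p.toList.length ∧ p ∈ pr.2) →
      ∃ pr ∈ List.foldl pvAddPat acc ps, pr.1 = p.toList.length ∧ p ∈ pr.2 := by
  induction ps with
  | nil =>
      intro acc p h
      rcases h with h | h
      · cases h
      · exact h
  | cons a t ih =>
      intro acc p h
      simp only [List.foldl_cons]
      rcases h with h | ⟨pr, hpr, h1, h2⟩
      · rcases List.mem_cons.mp h with rfl | hmem
        · exact ih _ p (Or.inr (pvAddPat_self acc p))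
        · exact ih _ p (Or.inl hmem)
      · obtain ⟨pr', hpr', he, hsub⟩ := pvAddPat_old acc a pr hpr
        exact ih _ p (Or.inr ⟨pr', hpr', he.trans h1, hsub p h2⟩)

theorem pvByLen_sound (ps : List String) (p : String) (h : p ∈ ps) :
    ∃ pr ∈ pvByLen ps, pr.1 = p.toList.length ∧ p ∈ pr.2 :=
  pvByLen_sound_aux ps [] p (Or.inl h)

theorem pvByLen_src_aux (ps : List String) :
    ∀ (acc : List (Nat × PySem.Set String)) (pr : Nat × PySem.Set String) (q : String),
      pr ∈ List.foldl pvAddPat acc ps → q ∈ pr.2 →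
      (q ∈ ps ∧ q.toList.length = pr.1) ∨ ∃ pr' ∈ acc, pr'.1 = pr.1 ∧ q ∈ pr'.2 := by
  induction ps with
  | nil =>
      intro acc pr q hpr hq
      exact Or.inr ⟨pr, hpr, rfl, hq⟩
  | cons a t ih =>
      intro acc pr q hpr hq
      simp only [List.foldl_cons] at hpr
      rcases ih _ pr q hpr hq with ⟨h1, h2⟩ | ⟨pr', hpr', he, hq'⟩
      · exact Or.inl ⟨List.mem_cons_of_mem _ h1, h2⟩
      · rcases pvAddPat_src acc a pr' q hpr' hq' with ⟨rfl, hl⟩ | ⟨pr'', hpr'', he', hq''⟩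
        · exact Or.inl ⟨List.mem_cons_self, by rw [← he, hl]⟩
        · exact Or.inr ⟨pr'', hpr'', he'.trans he, hq''⟩

theorem pvByLen_src (ps : List String) (pr : Nat × PySem.Set String) (q : String)
    (hpr : pr ∈ pvByLen ps) (hq : q ∈ pr.2) : q ∈ ps ∧ q.toList.length = pr.1 := by
  rcases pvByLen_src_aux ps [] pr q hpr hq with h | ⟨_, h, _⟩
  · exact h
  · cases h

theorem pvBuildDp_getD (items : List (Nat × PySem.Set String)) :
    ∀ (d : List Char) (k : Nat), k ≤ d.length →
      (pvBuildDp items d).getD k false = (pvBuildDp items (d.drop k)).getD 0 false := by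
  intro d
  induction d with
  | nil => intro k hk; simp at hk; subst hk; rfl
  | cons c rest ih =>
      intro k hk
      cases k with
      | zero => rfl
      | succ k' =>
          simp only [pvBuildDp, List.getD_cons_succ, List.drop_succ_cons]
          exact ih k' (by simpa using hk)

-- Case '' ∉ patterns: suffix-by-suffix agreement of the two ports.
theorem pvIsPossibleA_eq_dp (ps : List String) (hps : "" ∉ ps) :
    ∀ (fuel : Nat) (d : List Char), d.length < fuel →
      pvIsPossibleA ps fuel d = (pvBuildDp (pvByLen ps) d).getD 0 false := by
  intro fuel
  induction fuel with
  | zero => intro d hd; omega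
  | succ n ih =>
      intro d hd
      cases d with
      | nil => rfl
      | cons c rest =>
          have hrlen : rest.length < n := by simp at hd; omega
          have hstep : ∀ l : Nat, 1 ≤ l → l ≤ rest.length + 1 →
              (false :: pvBuildDp (pvByLen ps) rest).getD l false
                = pvIsPossibleA ps n ((c :: rest).drop l) := by
            intro l h1 h2
            obtain ⟨m, rfl⟩ : ∃ m, l = m + 1 := ⟨l - 1, by omega⟩
            simp only [List.getD_cons_succ, List.drop_succ_cons]
            rw [pvBuildDp_getD (pvByLen ps) rest m (by omega)]
            exact (ih (rest.drop m) (by simp; omega)).symm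
          simp only [pvIsPossibleA, List.isEmpty_cons, Bool.false_or, pvBuildDp,
            List.getD_cons_zero]
          apply Bool.coe_iff_coe.mp
          simp only [List.any_eq_true]
          constructor
          · rintro ⟨p, hp, hcond⟩
            simp only [Bool.and_eq_true] at hcond
            obtain ⟨hpre, hrec⟩ := hcond
            have hplen : 1 ≤ p.toList.length := by
              rcases Nat.eq_zero_or_pos p.toList.length with h0 | h1
              · exact absurd (by rw [String.toList_eq_nil_iff.mp
                  (List.eq_nil_of_length_eq_zero h0)] at hp; exact hp) hps
              · exact h1
            have hpfx : p.toList <+: (c :: rest) := List.isPrefixOf_iff_prefix.mp hpre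
            have hle : p.toList.length ≤ rest.length + 1 := by
              have := List.IsPrefix.length_le hpfx
              simpa using this
            obtain ⟨pr, hpr, hlen, hmem⟩ := pvByLen_sound ps p hp
            refine ⟨pr, hpr, ?_⟩
            simp only [Bool.and_eq_true, decide_eq_true_eq]
            refine ⟨⟨by omega, ?_⟩, ?_⟩
            · rw [hlen, hstep p.toList.length hplen hle]
              exact hrec
            · have htake : (c :: rest).take p.toList.length = p.toList :=
                (List.prefix_iff_eq_take.mp hpfx).symm
              rw [hlen, htake, String.ofList_toList]
              exact List.contains_iff_mem.mpr hmem
          · rintro ⟨pr, hpr, hcond⟩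
            simp only [Bool.and_eq_true, decide_eq_true_eq] at hcond
            obtain ⟨⟨hle, hdp⟩, hct⟩ := hcond
            set q : String := String.ofList ((c :: rest).take pr.1) with hqdef
            have hqmem : q ∈ pr.2 := List.contains_iff_mem.mp hct
            obtain ⟨hqps, hqlen⟩ := pvByLen_src ps pr q hpr hqmem
            have hqto : q.toList = (c :: rest).take pr.1 := by
              rw [hqdef, String.toList_ofList]
            have hplen : 1 ≤ pr.1 := by
              rcases Nat.eq_zero_or_pos pr.1 with h0 | h1
              · have hq0 : q.toList = [] := List.eq_nil_of_length_eq_zero (by omega)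
                rw [String.toList_eq_nil_iff.mp hq0] at hqps
                exact absurd hqps hps
              · exact h1
            have hpfx : q.toList <+: (c :: rest) := by
              rw [List.prefix_iff_eq_take, hqto, List.length_take]
              congr 1
              simp; omega
            refine ⟨q, hqps, ?_⟩
            simp only [Bool.and_eq_true]
            refine ⟨List.isPrefixOf_iff_prefix.mpr hpfx, ?_⟩
            rw [hqlen, ← hstep pr.1 hplen (by simpa using hle)]
            exact hdp

theorem pv_mem_of_takeWhile {p : String} {ps : List String}
    (h : p ∈ ps.takeWhile (fun q => q ≠ "")) : p ∈ ps :=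
  (List.takeWhile_sublist _).mem h

-- Case '' ∈ patterns but A terminates: the forced greedy walk succeeds on every
-- design, hence BOTH ports return true on every design.
theorem pvGreedyOk_step (E : List String) (c : Char) (rest d' : List Char)
    (hstep : pvGreedyStep E (c :: rest) = some d')
    (hg : pvGreedyOk E (c :: rest) = true) : pvGreedyOk E d' = true := by
  rw [pvGreedyOk] at hg
  simp only [List.isEmpty_cons, if_neg Bool.false_ne_true] at hg
  split at hg
  · simp at hg
  · rename_i d'' hstep'
    rw [hstep] at hstep'
    obtain rfl : d' = d'' := Option.some.inj hstep'
    exact hg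

theorem pvGreedyOk_not_nil (E : List String) (c : Char) (rest : List Char)
    (hg : pvGreedyOk E (c :: rest) = true) :
    ∃ d', pvGreedyStep E (c :: rest) = some d' := by
  rw [pvGreedyOk] at hg
  simp only [List.isEmpty_cons, if_neg Bool.false_ne_true] at hg
  cases hstep : pvGreedyStep E (c :: rest) with
  | none => rw [hstep] at hg; simp at hg
  | some d' => exact ⟨d', rfl⟩

theorem pvIsPossibleA_fuel_mono (ps : List String) :
    ∀ (f1 f2 : Nat) (d : List Char), f1 ≤ f2 →
      pvIsPossibleA ps f1 d = true → pvIsPossibleA ps f2 d = true := by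
  intro f1
  induction f1 with
  | zero => intro f2 d _ h; simp [pvIsPossibleA] at h
  | succ n ih =>
      intro f2 d hle h
      obtain ⟨m, rfl⟩ : ∃ m, f2 = m + 1 := ⟨f2 - 1, by omega⟩
      simp only [pvIsPossibleA, Bool.or_eq_true, List.any_eq_true] at h ⊢
      rcases h with h | ⟨p, hp, hcond⟩
      · exact Or.inl h
      · refine Or.inr ⟨p, hp, ?_⟩
        simp only [Bool.and_eq_true] at hcond ⊢
        exact ⟨hcond.1, ih m _ (by omega) hcond.2⟩

theorem pvGreedy_A_true (ps : List String) :
    ∀ (n : Nat) (d : List Char), d.length ≤ n →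
      pvGreedyOk (ps.takeWhile (fun q => q ≠ "")) d = true →
      pvIsPossibleA ps (d.length + 1) d = true := by
  intro n
  induction n with
  | zero =>
      intro d hd _
      have : d = [] := List.eq_nil_of_length_eq_zero (by omega)
      subst this; rfl
  | succ n ih =>
      intro d hd hg
      cases hdnil : d with
      | nil => rfl
      | cons c rest =>
          subst hdnil
          obtain ⟨d', hstep⟩ := pvGreedyOk_not_nil _ _ _ hg
          have hg' := pvGreedyOk_step _ _ _ _ hstep hg
          obtain ⟨p, hpE, hp⟩ := List.exists_of_findSome?_eq_some hstep
          by_cases hc : p.toList ≠ [] ∧ p.toList.isPrefixOf (c :: rest)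
          · rw [if_pos hc] at hp
            have hd' : (c :: rest).drop p.toList.length = d' := Option.some.inj hp
            have hlt : d'.length < (c :: rest).length := pvGreedyStep_lt _ _ _ hstep
            have hrec : pvIsPossibleA ps (d'.length + 1) d' = true :=
              ih d' (by simp at hd hlt ⊢; omega) hg'
            simp only [pvIsPossibleA, Bool.or_eq_true, List.any_eq_true]
            refine Or.inr ⟨p, pv_mem_of_takeWhile hpE, ?_⟩
            simp only [Bool.and_eq_true]
            refine ⟨hc.2, ?_⟩
            rw [hd']
            exact pvIsPossibleA_fuel_mono ps (d'.length + 1) _ d' (by simp at hlt ⊢; omega) hrec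
          · rw [if_neg hc] at hp; cases hp

theorem pvGreedy_B_true (ps : List String) :
    ∀ (n : Nat) (d : List Char), d.length ≤ n →
      pvGreedyOk (ps.takeWhile (fun q => q ≠ "")) d = true →
      (pvBuildDp (pvByLen ps) d).getD 0 false = true := by
  intro n
  induction n with
  | zero =>
      intro d hd _
      have : d = [] := List.eq_nil_of_length_eq_zero (by omega)
      subst this; rfl
  | succ n ih =>
      intro d hd hg
      cases hdnil : d with
      | nil => rfl
      | cons c rest =>
          subst hdnil
          obtain ⟨d', hstep⟩ := pvGreedyOk_not_nil _ _ _ hg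
          have hg' := pvGreedyOk_step _ _ _ _ hstep hg
          obtain ⟨p, hpE, hp⟩ := List.exists_of_findSome?_eq_some hstep
          by_cases hc : p.toList ≠ [] ∧ p.toList.isPrefixOf (c :: rest)
          · rw [if_pos hc] at hp
            have hd' : (c :: rest).drop p.toList.length = d' := Option.some.inj hp
            have hplen : 1 ≤ p.toList.length :=
              Nat.one_le_iff_ne_zero.mpr (fun h0 => hc.1 (List.eq_nil_of_length_eq_zero h0))
            have hpfx : p.toList <+: (c :: rest) := List.isPrefixOf_iff_prefix.mp hc.2
            have hle : p.toList.length ≤ rest.length + 1 := by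
              have := List.IsPrefix.length_le hpfx
              simpa using this
            obtain ⟨pr, hpr, hlen, hmem⟩ := pvByLen_sound ps p (pv_mem_of_takeWhile hpE)
            simp only [pvBuildDp, List.getD_cons_zero, List.any_eq_true]
            refine ⟨pr, hpr, ?_⟩
            simp only [Bool.and_eq_true, decide_eq_true_eq]
            obtain ⟨m, hm⟩ : ∃ m, p.toList.length = m + 1 := ⟨p.toList.length - 1, by omega⟩
            refine ⟨⟨by omega, ?_⟩, ?_⟩
            · rw [hlen, hm]
              simp only [List.getD_cons_succ]
              rw [pvBuildDp_getD (pvByLen ps) rest m (by omega)]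
              have hrd : rest.drop m = d' := by
                rw [← hd', hm]; simp
              rw [hrd]
              exact ih d' (by have := pvGreedyStep_lt _ _ _ hstep; simp at this hd ⊢; omega) hg'
            · have htake : (c :: rest).take p.toList.length = p.toList :=
                (List.prefix_iff_eq_take.mp hpfx).symm
              rw [hlen, htake, String.ofList_toList]
              exact List.contains_iff_mem.mpr hmem
          · rw [if_neg hc] at hp; cases hp

theorem pv_foldl_eq (ps : List String) :
    ∀ (dds : List String) (acc : Int),
      (∀ s ∈ dds, pvIsPossibleA ps (s.toList.length + 1) s.toList
                = (pvBuildDp (pvByLen ps) s.toList).getD 0 false) →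
      dds.foldl (fun acc s => acc + (if pvIsPossibleA ps (s.toList.length + 1) s.toList then 1 else 0)) acc
      = dds.foldl (fun acc s => acc + (if (pvBuildDp (pvByLen ps) s.toList).getD 0 false then 1 else 0)) acc := by
  intro dds
  induction dds with
  | nil => intro acc _; rfl
  | cons s t ih =>
      intro acc h
      simp only [List.foldl_cons]
      rw [h s (List.mem_cons_self), ih _ (fun x hx => h x (List.mem_cons_of_mem _ hx))]

-- ===== VERDICT (by name: the statement is the Claim_ definition above) =====
theorem countPossibleDesigns_spec : Claim_equal_countPossibleDesigns := by
  intro aps dds _ hpre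
  unfold Spec_countPossibleDesigns countPossibleDesigns countPossibleDesigns_alt
  apply pv_foldl_eq
  intro s hs
  rcases hpre with h | h
  · exact pvIsPossibleA_eq_dp aps h (s.toList.length + 1) s.toList (Nat.lt_succ_self _)
  · rw [pvGreedy_A_true aps s.toList.length s.toList le_rfl (h s hs),
        pvGreedy_B_true aps s.toList.length s.toList le_rfl (h s hs)]
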